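-- pv_equiv track=rewrite | github.com/hukx-issac/DePoD | dataloader/dataloader.py | _create_masked_lm_predictions_force_last
-- ===== SOURCE A (Python) =====
-- def _create_masked_lm_predictions_force_last(tokens):
--     """Creates the predictions for the masked LM objective."""
--
--     last_index = -1
--     for (i, token) in enumerate(tokens):
--         if token == "[CLS]" or token == "[PAD]" or token == '[NO_USE]':
--             continue
--         last_index = i
--
--     assert last_index > 0
--
--     output_tokens = list(tokens)
--     output_tokens[last_index] = "[MASK]"
--
--     masked_lm_positions = [last_index]
--     masked_lm_labels = [tokens[last_index]]
--
--     return (output_tokens, masked_lm_positions, masked_lm_labels)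
-- ===== SOURCE B (Python) =====
-- def _create_masked_lm_predictions_force_last(tokens):
--     """Creates the predictions for the masked LM objective."""
--
--     # One fused pass: walk the tokens back-to-front, emitting the output list in
--     # reverse while masking the first non-special token encountered (i.e. the
--     # last one in the original order). No separate index search, no copy, no
--     # in-place assignment.
--     output_rev = []
--     masked = None  # (index, label) once the mask has been placed
--     for i, t in reversed(list(enumerate(tokens))):
--         if masked is None and t not in ("[CLS]", "[PAD]", "[NO_USE]"):
--             output_rev.append("[MASK]")
--             masked = (i, t)
--         else:
--             output_rev.append(t)
--
--     assert masked is not None and masked[0] > 0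
--
--     output_rev.reverse()
--     return (output_rev, [masked[0]], [masked[1]])
-- ===== Notes on version B (the rewrite author's own statement) =====
-- stated objective: alternative
-- what changed: Replaces A's three stages (forward overwrite scan for last_index, list copy, then in-place assignment and indexing) with one fused back-to-front pass that emits the output list in reverse, substituting [MASK] and capturing (index, label) when it first meets a non-special token; there is no last_index overwrite loop, no copy and no indexed assignment.
import Mathlib
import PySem

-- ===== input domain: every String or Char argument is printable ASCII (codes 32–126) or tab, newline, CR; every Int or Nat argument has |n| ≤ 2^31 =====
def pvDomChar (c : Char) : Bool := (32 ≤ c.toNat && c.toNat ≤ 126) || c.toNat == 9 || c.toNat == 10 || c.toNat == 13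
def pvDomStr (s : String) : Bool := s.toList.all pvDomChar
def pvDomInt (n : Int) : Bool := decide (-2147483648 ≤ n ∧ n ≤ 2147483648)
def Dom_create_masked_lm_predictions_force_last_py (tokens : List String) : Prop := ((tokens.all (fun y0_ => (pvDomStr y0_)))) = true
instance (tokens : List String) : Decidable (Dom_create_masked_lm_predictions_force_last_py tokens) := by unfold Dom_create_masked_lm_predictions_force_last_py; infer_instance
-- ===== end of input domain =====

-- ===== PORT A =====
-- B replaces A's three stages (scan for last_index, copy, assign) with one fused
-- back-to-front pass that builds the masked output in reverse while capturing the
-- (index, label) of the last non-special token (objective: alternative, same O(n) cost).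

-- token == "[CLS]" or token == "[PAD]" or token == '[NO_USE]'
def pvSpecialTok (t : String) : Bool := t == "[CLS]" || t == "[PAD]" || t == "[NO_USE]"

def create_masked_lm_predictions_force_last_py (tokens : List String) : List String × List Int × List String :=
  -- for (i, token) in enumerate(tokens): if special: continue; last_index = i
  let last_index : Int :=
    (PySem.List.enumerate tokens 0).foldl (fun acc p => if pvSpecialTok p.2 then acc else p.1) (-1)
  -- output_tokens = list(tokens); output_tokens[last_index] = "[MASK]"
  let output_tokens := PySem.List.pySetD tokens last_index "[MASK]"
  (output_tokens, [last_index], [PySem.List.pyGetD tokens last_index ""])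

-- ===== PORT B =====
-- One fused back-to-front pass: emit the output in reverse, masking at the first
-- non-special token met (the last in original order) and capturing (index, label).
def pvStep (acc : List String × Option (Int × String)) (p : Int × String) :
    List String × Option (Int × String) :=
  match acc.2 with
  | some _ => (acc.1 ++ [p.2], acc.2)
  | none =>
    if pvSpecialTok p.2 then (acc.1 ++ [p.2], none)
    else (acc.1 ++ ["[MASK]"], some (p.1, p.2))

def create_masked_lm_predictions_force_last_py_alt (tokens : List String) : List String × List Int × List String :=
  let st := ((PySem.List.enumerate tokens 0).reverse).foldl pvStep ([], none)
  match st.2 with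
  | some (i, label) => (st.1.reverse, [i], [label])
  | none => ([], [-1], [])   -- unreachable under Pre_ (Python raises AssertionError here)

-- ===== PRECONDITION & SPEC =====
-- Pre_ excludes exactly the inputs on which A's `assert last_index > 0` fails
-- (AssertionError): those where no token after index 0 is non-special; B's assert
-- fails there identically.
def Pre_create_masked_lm_predictions_force_last_py (tokens : List String) : Prop :=
  (tokens.drop 1).any (fun t => !pvSpecialTok t) = true
instance (tokens : List String) : Decidable (Pre_create_masked_lm_predictions_force_last_py tokens) := by unfold Pre_create_masked_lm_predictions_force_last_py; infer_instance

def pvWitness_create_masked_lm_predictions_force_last_py : List String := ["[CLS]", "hello", "world", "[PAD]"]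

def Spec_create_masked_lm_predictions_force_last_py (tokens : List String) (out : List String × List Int × List String) : Prop := out = create_masked_lm_predictions_force_last_py_alt tokens
instance (tokens : List String) (out : List String × List Int × List String) : Decidable (Spec_create_masked_lm_predictions_force_last_py tokens out) := by unfold Spec_create_masked_lm_predictions_force_last_py; infer_instance

-- ===== CLAIM (what is proved, stated in full; the proofs are below) =====
def Claim_equal_create_masked_lm_predictions_force_last_py : Prop := ∀ (tokens : List String), Dom_create_masked_lm_predictions_force_last_py tokens → Pre_create_masked_lm_predictions_force_last_py tokens → Spec_create_masked_lm_predictions_force_last_py tokens (create_masked_lm_predictions_force_last_py tokens)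

-- ===== LEMMAS AND PROOFS =====

-- Index of the LAST non-special token, in the same recursion shape as pvMaskLast.
def pvLastNS : List String → Option Nat
  | [] => none
  | t :: ts =>
    match pvLastNS ts with
    | some k => some (k + 1)
    | none => if pvSpecialTok t then none else some 0

-- B's reverse fold in terms of pvLastNS: it builds the reversed masked list and
-- records the last non-special token's (index, label).
theorem pv_foldrev_eq (l : List String) (s : Int) :
    ((PySem.List.enumerate l s).reverse).foldl pvStep ([], none) =
      match pvLastNS l with
      | some k => ((l.set k "[MASK]").reverse, some (s + (k : Int), l.getD k ""))
      | none => (l.reverse, none) := by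
  induction l generalizing s with
  | nil => simp [PySem.List.enumerate_nil, pvLastNS]
  | cons t ts ih =>
    rw [PySem.List.enumerate_cons, List.reverse_cons, List.foldl_append, ih (s + 1)]
    simp only [List.foldl_cons, List.foldl_nil, pvLastNS]
    cases hts : pvLastNS ts with
    | some k =>
      simp only [pvStep]
      have : s + 1 + (k : Int) = s + ((k + 1 : Nat) : Int) := by push_cast; ring
      simp [this]
    | none =>
      by_cases hs : pvSpecialTok t = true <;> simp [pvStep, hs]

-- A's fold over enumerate computes pvLastNS (shifted by the enumeration start).
theorem pv_fold_eq_lastNS (l : List String) (s : Int) (acc : Int) :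
    (PySem.List.enumerate l s).foldl (fun acc p => if pvSpecialTok p.2 then acc else p.1) acc =
      match pvLastNS l with
      | some k => s + (k : Int)
      | none => acc := by
  induction l generalizing s acc with
  | nil => simp [PySem.List.enumerate_nil, pvLastNS]
  | cons t ts ih =>
    simp only [PySem.List.enumerate_cons, List.foldl_cons, pvLastNS]
    rw [ih]
    cases hts : pvLastNS ts with
    | some k =>
      simp only
      have : s + 1 + (k : Int) = s + ((k + 1 : Nat) : Int) := by push_cast; ring
      simp [this]
    | none =>
      by_cases hs : pvSpecialTok t = true <;> simp [hs]

-- Under Pre_, some token (after index 0) is non-special, so pvLastNS finds one with k > 0.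
theorem pvLastNS_pos (tokens : List String)
    (h : Pre_create_masked_lm_predictions_force_last_py tokens) :
    ∃ k : Nat, pvLastNS tokens = some k ∧ 0 < k := by
  unfold Pre_create_masked_lm_predictions_force_last_py at h
  rcases tokens with _ | ⟨t, ts⟩
  · simp at h
  · simp only [List.drop_succ_cons, List.drop_zero] at h
    have : ∃ m, pvLastNS ts = some m := by
      clear t
      induction ts with
      | nil => simp at h
      | cons u us ih =>
        simp only [pvLastNS]
        cases hus : pvLastNS us with
        | some m => exact ⟨m + 1, by simp⟩
        | none =>
          simp only [List.any_cons, Bool.or_eq_true] at h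
          rcases h with h | h
          · simp only [Bool.not_eq_true'] at h
            exact ⟨0, by simp [h]⟩
          · obtain ⟨m, hm⟩ := ih h; simp [hm] at hus
    obtain ⟨m, hm⟩ := this
    exact ⟨m + 1, by simp [pvLastNS, hm], by omega⟩

-- ===== VERDICT (by name: the statement is the Claim_ definition above) =====
theorem create_masked_lm_predictions_force_last_py_spec : Claim_equal_create_masked_lm_predictions_force_last_py := by
  intro tokens _ hPre
  unfold Spec_create_masked_lm_predictions_force_last_py
  unfold create_masked_lm_predictions_force_last_py create_masked_lm_predictions_force_last_py_alt
  obtain ⟨k, hk, hkpos⟩ := pvLastNS_pos tokens hPre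
  rw [pv_foldrev_eq, pv_fold_eq_lastNS, hk]
  simp only [zero_add, List.reverse_reverse]
  rw [PySem.List.pySetD_natCast, PySem.List.pyGetD_natCast]
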